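-- pv_equiv track=rewrite | github.com/MrBrantCode/unitest_baseline | mut_generate/mist_train_cf/cf_67293/solution.py | sorting_chars
-- ===== SOURCE A (Python) =====
-- from typing import List, Optional
--
-- def sorting_chars(strings: List[str]) -> Optional[str]:
--     if len(strings) == 0 or all([not s.strip() for s in strings]):
--         return None
--
--     final = []
--     for s in strings:
--         sorted_str = ''.join(sorted([ch for ch in s if ch.isalpha()]))
--         final.append(sorted_str)
--     return ' '.join(final)
-- ===== SOURCE B (Python) =====
-- from typing import List, Optional
--
-- def sorting_chars(strings: List[str]) -> Optional[str]:
--     if not any(s.strip() for s in strings):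
--         return None
--     parts = []
--     for s in strings:
--         counts = {}
--         for ch in s:
--             if ch.isalpha():
--                 counts[ch] = counts.get(ch, 0) + 1
--         parts.append(''.join(chr(c) * counts.get(chr(c), 0) for c in range(65, 123)))
--     return ' '.join(parts)
-- ===== Notes on version B (the rewrite author's own statement) =====
-- stated objective: alternative
-- what changed: Per string, the comparison sort of the letters is replaced by a counting pass (a dict of letter counts) followed by emitting each ASCII letter code 65..122 count-many times, and the emptiness test uses any() directly instead of len==0-or-all(not ...).
import Mathlib
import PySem

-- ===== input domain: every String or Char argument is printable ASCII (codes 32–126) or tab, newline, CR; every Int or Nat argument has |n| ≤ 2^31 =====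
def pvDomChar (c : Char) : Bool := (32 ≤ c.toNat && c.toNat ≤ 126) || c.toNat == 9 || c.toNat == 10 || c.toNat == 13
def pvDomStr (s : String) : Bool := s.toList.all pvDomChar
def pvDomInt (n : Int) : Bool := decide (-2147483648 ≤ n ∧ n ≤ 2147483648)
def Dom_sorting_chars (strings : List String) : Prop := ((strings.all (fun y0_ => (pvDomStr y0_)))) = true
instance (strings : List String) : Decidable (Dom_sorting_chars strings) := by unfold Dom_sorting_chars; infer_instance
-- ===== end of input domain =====

-- B replaces the per-string comparison sort of the letters by a counting pass (a dict of
-- letter counts) emitted over the bounded ASCII letter alphabet; same cost, not faster.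

-- ===== PORT A =====
def sorting_chars (strings : List String) : Option String :=
  if strings.length == 0 || (strings.map (fun s => PySem.Chars.strip s.toList == [])).all id then
    none
  else
    let final := strings.foldl (fun acc s =>
      acc ++ [String.ofList (PySem.List.sorted (s.toList.filter (fun ch => PySem.Chars.isalpha ch)) (fun x => x) false)]) []
    some (PySem.Str.join " " final)

-- ===== PORT B =====
def sortingCharsPart (cs : List Char) : List Char :=
  let counts : PySem.Dict Char Int :=
    cs.foldl (fun d ch => if PySem.Chars.isalpha ch then d.insert ch (d.getD ch 0 + 1) else d)
      PySem.Dict.empty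
  (PySem.List.pyRange 65 123 1).flatMap
    (fun c => PySem.List.pyRepeat [Char.ofNat c.toNat] (counts.getD (Char.ofNat c.toNat) 0))

def sorting_chars_alt (strings : List String) : Option String :=
  if !(strings.any (fun s => !(PySem.Chars.strip s.toList == []))) then
    none
  else
    some (PySem.Str.join " " (strings.map (fun s => String.ofList (sortingCharsPart s.toList))))

-- ===== PRECONDITION & SPEC =====
def Spec_sorting_chars (strings : List String) (out : Option String) : Prop := out = sorting_chars_alt strings
instance (strings : List String) (out : Option String) : Decidable (Spec_sorting_chars strings out) := by unfold Spec_sorting_chars; infer_instance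

-- ===== CLAIM (what is proved, stated in full; the proofs are below) =====
def Claim_equal_sorting_chars : Prop := ∀ (strings : List String), Dom_sorting_chars strings → Spec_sorting_chars strings (sorting_chars strings)

-- ===== LEMMAS AND PROOFS =====

lemma pv_isalpha_bounds (d : Char) (h : PySem.Chars.isalpha d = true) :
    65 ≤ d.toNat ∧ d.toNat < 123 := by
  simp [PySem.Chars.isalpha, PySem.Chars.isupper, PySem.Chars.islower, Char.le_def,
    UInt32.le_iff_toNat_le] at h
  have : d.toNat = d.val.toNat := rfl
  rcases h with ⟨h1, h2⟩ | ⟨h1, h2⟩ <;> constructor <;> omega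

lemma pv_sum_count (d : Char) (l : List Char) :
    ∀ codes : List Nat, codes.Nodup → (∀ c ∈ codes, Nat.isValidChar c) →
    ((codes.map (fun c => List.replicate (l.count (Char.ofNat c)) (Char.ofNat c))).map
      (List.count d)).sum = if d.toNat ∈ codes then l.count d else 0 := by
  intro codes
  induction codes with
  | nil => simp
  | cons c cs ih =>
    intro hnd hval
    have hndtail := hnd.of_cons
    have hvaltail : ∀ x ∈ cs, Nat.isValidChar x := fun x hx => hval x (List.mem_cons_of_mem _ hx)
    have hnotmem : c ∉ cs := (List.nodup_cons.mp hnd).1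
    simp only [List.map_cons, List.sum_cons, List.count_replicate]
    rw [ih hndtail hvaltail]
    by_cases hc : c = d.toNat
    · subst hc
      have hmem : d.toNat ∉ cs := hnotmem
      simp [Char.ofNat_toNat, hmem]
    · have hne : Char.ofNat c ≠ d := by
        intro he
        have h2 : (Char.ofNat c).toNat = d.toNat := by rw [he]
        rw [Char.toNat_ofNat, if_pos (hval c (List.mem_cons_self))] at h2
        exact hc h2
      have hne' : (Char.ofNat c == d) = false := by simp [hne]
      have hmm : d.toNat ∈ c :: cs ↔ d.toNat ∈ cs := by
        constructor
        · intro h; rcases List.mem_cons.mp h with h | h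
          · exact absurd h.symm hc
          · exact h
        · exact List.mem_cons_of_mem _
      simp [hne', hmm]

lemma pv_codes_valid : ∀ c ∈ List.range' 65 58, Nat.isValidChar c := by decide

lemma pv_part_eq (cs : List Char) :
    sortingCharsPart cs =
      PySem.List.sorted (cs.filter (fun ch => PySem.Chars.isalpha ch)) (fun x => x) false := by
  set l := cs.filter (fun ch => PySem.Chars.isalpha ch) with hl
  have hcounts :
      cs.foldl (fun d ch => if PySem.Chars.isalpha ch then d.insert ch (d.getD ch 0 + 1) else d)
        PySem.Dict.empty = PySem.Dict.counter l := by
    rw [PySem.List.foldl_if_eq_foldl_filter (fun ch => PySem.Chars.isalpha ch)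
      (fun d ch => PySem.Dict.insert d ch (PySem.Dict.getD d ch 0 + 1)) cs PySem.Dict.empty]
    exact PySem.Dict.foldl_insert_getD_add_one_eq_counter _
  have hrange : PySem.List.pyRange 65 123 1 = (List.range' 65 58).map (fun n => Int.ofNat n) := by
    decide
  have hbody : sortingCharsPart cs =
      ((List.range' 65 58).map
        (fun c => List.replicate (l.count (Char.ofNat c)) (Char.ofNat c))).flatten := by
    unfold sortingCharsPart
    rw [hcounts, hrange, List.flatMap_map]
    rw [List.flatMap_def]
    congr 1
    apply List.map_congr_left
    intro c _
    simp [PySem.Dict.getD_counter, PySem.List.pyRepeat_singleton]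
  rw [hbody]
  refine (PySem.List.sorted_id_eq_of_perm_of_pairwise _ _ ?_ ?_).symm
  · -- permutation, via counts
    rw [List.perm_iff_count]
    intro d
    rw [List.count_flatten,
      pv_sum_count d l (List.range' 65 58) (List.nodup_range' 1) pv_codes_valid]
    by_cases ha : PySem.Chars.isalpha d = true
    · have hb := pv_isalpha_bounds d ha
      have : d.toNat ∈ List.range' 65 58 := by
        rw [List.mem_range'_1]; omega
      simp [this]
    · have hnot : d ∉ l := by
        intro hmem
        exact ha (List.of_mem_filter hmem)
      have hz : l.count d = 0 := List.count_eq_zero.mpr hnot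
      by_cases hm : d.toNat ∈ List.range' 65 58 <;> simp [hm, hz]
  · -- sortedness
    rw [List.pairwise_flatten]
    constructor
    · intro blk hblk
      rcases List.mem_map.mp hblk with ⟨c, _, rfl⟩
      exact List.pairwise_replicate.mpr (Or.inr le_rfl)
    · rw [List.pairwise_map]
      have hmono : (List.range' 65 58).Pairwise (fun a b => Char.ofNat a ≤ Char.ofNat b) := by
        decide
      refine hmono.imp_of_mem ?_
      intro a b _ _ hab x hx y hy
      rw [List.eq_of_mem_replicate hx, List.eq_of_mem_replicate hy]
      exact hab

lemma pv_cond_eq (strings : List String) :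
    (strings.length == 0 || (strings.map (fun s => PySem.Chars.strip s.toList == [])).all id)
      = !(strings.any (fun s => !(PySem.Chars.strip s.toList == []))) := by
  cases strings with
  | nil => simp
  | cons s t =>
    simp only [List.length_cons, List.map_cons, List.all_cons, List.any_cons]
    rcases hb : (PySem.Chars.strip s.toList == []) with _ | _ <;>
      simp [List.all_eq_not_any_not, Function.comp_def]

-- ===== VERDICT (by name: the statement is the Claim_ definition above) =====
theorem sorting_chars_spec : Claim_equal_sorting_chars := by
  intro strings _
  unfold Spec_sorting_chars sorting_chars sorting_chars_alt
  rw [pv_cond_eq]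
  have hmap : strings.foldl (fun acc s =>
      acc ++ [String.ofList (PySem.List.sorted (s.toList.filter (fun ch => PySem.Chars.isalpha ch)) (fun x => x) false)]) []
      = strings.map (fun s => String.ofList (sortingCharsPart s.toList)) := by
    rw [PySem.List.foldl_append_singleton_eq_map, List.nil_append]
    apply List.map_congr_left
    intro s _
    rw [pv_part_eq]
  by_cases h : (!(strings.any (fun s => !(PySem.Chars.strip s.toList == [])))) = true
  · rw [if_pos h, if_pos h]
  · rw [if_neg h, if_neg h]
    simp only []
    rw [hmap]
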